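-- pv_equiv track=rewrite | github.com/RexPlanalp/TDSE | Circular_Analysis/Circular_Energy/Module.py | lm_to_block
-- ===== SOURCE A (Python) =====
-- def lm_to_block(lmax):
--     def block_number(l, m):
--         sum_blocks = sum(2*i + 1 for i in range(l))
--         m_offset = m + l
--         return sum_blocks + m_offset
--     lm_dict = {}
--     for l in range(lmax+1):
--         for m in range(-l,l+1):
--             lm_dict[(l,m)] = block_number(l,m)
--     return lm_dict
-- ===== SOURCE B (Python) =====
-- def lm_to_block(lmax):
--     # closed form: the blocks for (l, m) are numbered sequentially, and
--     # sum(2*i+1 for i in range(l)) == l*l, so the index is l*l + l + m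
--     return {(l, m): l*l + l + m for l in range(lmax + 1) for m in range(-l, l + 1)}
-- ===== Notes on version B (the rewrite author's own statement) =====
-- stated objective: faster
-- what changed: replaces the per-entry inner loop sum(2*i+1 for i in range(l)) by the closed form l*l and builds the dict in one comprehension
import Mathlib
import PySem

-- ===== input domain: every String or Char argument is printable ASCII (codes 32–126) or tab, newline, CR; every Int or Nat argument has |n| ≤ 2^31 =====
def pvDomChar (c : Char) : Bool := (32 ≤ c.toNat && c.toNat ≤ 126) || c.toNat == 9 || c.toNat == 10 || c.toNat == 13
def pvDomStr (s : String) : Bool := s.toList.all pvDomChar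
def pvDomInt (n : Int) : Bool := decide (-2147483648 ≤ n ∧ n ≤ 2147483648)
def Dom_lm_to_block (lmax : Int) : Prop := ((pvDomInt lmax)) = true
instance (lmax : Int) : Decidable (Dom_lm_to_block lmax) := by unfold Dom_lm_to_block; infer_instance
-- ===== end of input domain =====

-- B replaces A's per-entry O(l) inner sum by the closed form l*l (asymptotically faster);
-- the dict (l,m) ↦ index is rendered as the List of (l, m, index) triples in insertion order.

-- ===== PORT A =====
-- inner helper block_number(l, m)
def pvBlockNumber (l m : Int) : Int :=
  let sum_blocks := ((PySem.List.pyRange 0 l 1).map (fun i => 2*i + 1)).sum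
  let m_offset := m + l
  sum_blocks + m_offset

def lm_to_block (lmax : Int) : List (Int × Int × Int) :=
  ((PySem.List.pyRange 0 (lmax+1) 1).foldl
      (fun d l => (PySem.List.pyRange (-l) (l+1) 1).foldl
        (fun d m => d.insert (l, m) (pvBlockNumber l m)) d)
      (PySem.Dict.empty : PySem.Dict (Int × Int) Int)).items.map
    (fun p => (p.1.1, p.1.2, p.2))

-- ===== PORT B =====
def lm_to_block_alt (lmax : Int) : List (Int × Int × Int) :=
  (PySem.List.pyRange 0 (lmax+1) 1).flatMap (fun l =>
    (PySem.List.pyRange (-l) (l+1) 1).map (fun m => (l, m, l*l + l + m)))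

-- ===== PRECONDITION & SPEC =====
def Spec_lm_to_block (lmax : Int) (out : List (Int × Int × Int)) : Prop := out = lm_to_block_alt lmax
instance (lmax : Int) (out : List (Int × Int × Int)) : Decidable (Spec_lm_to_block lmax out) := by unfold Spec_lm_to_block; infer_instance

-- ===== CLAIM (what is proved, stated in full; the proofs are below) =====
def Claim_equal_lm_to_block : Prop := ∀ (lmax : Int), Dom_lm_to_block lmax → Spec_lm_to_block lmax (lm_to_block lmax)

-- ===== LEMMAS AND PROOFS =====

-- the (l, m) key pairs A's loops run over, in order
def pvPairs (lmax : Int) : List (Int × Int) :=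
  (PySem.List.pyRange 0 (lmax+1) 1).flatMap (fun l =>
    (PySem.List.pyRange (-l) (l+1) 1).map (fun m => (l, m)))

theorem pvSumRangeOdd (n : Nat) :
    ((List.range n).map (fun k : Nat => 2*(k:Int)+1)).sum = n*n := by
  induction n with
  | zero => simp
  | succ n ih => simp [List.range_succ, ih]; ring

theorem pvBlockNumber_closed (l m : Int) (hl : 0 ≤ l) :
    pvBlockNumber l m = l*l + l + m := by
  have hmap : (List.range (l-0).toNat).map ((fun i => 2*i + 1) ∘ fun k : Nat => (0:Int) + k)
      = (List.range (l-0).toNat).map (fun k : Nat => 2*(k:Int)+1) :=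
    List.map_congr_left (fun a _ => by simp [Function.comp])
  have hcast : (((l-0).toNat : Int)) = l := by omega
  have h : ((PySem.List.pyRange 0 l 1).map (fun i => 2*i + 1)).sum = l*l := by
    rw [PySem.List.pyRange_one, List.map_map, hmap, pvSumRangeOdd, hcast]
  simp only [pvBlockNumber, h]; ring

theorem pvPairs_nodup (lmax : Int) : (pvPairs lmax).Nodup := by
  unfold pvPairs
  rw [List.nodup_flatMap]
  constructor
  · intro l _
    exact (PySem.List.nodup_pyRange_one _ _).map (fun a b h => by
      simpa using congrArg Prod.snd h)
  · refine (PySem.List.pairwise_lt_pyRange_one 0 (lmax+1)).imp ?_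
    intro a b hab x hxa hxb
    simp only [List.mem_map] at hxa hxb
    obtain ⟨m1, _, rfl⟩ := hxa
    obtain ⟨m2, _, h2⟩ := hxb
    have := congrArg Prod.fst h2
    simp at this
    omega

theorem pvFold_items (lmax : Int) :
    ((PySem.List.pyRange 0 (lmax+1) 1).foldl
      (fun d l => (PySem.List.pyRange (-l) (l+1) 1).foldl
        (fun d m => d.insert (l, m) (pvBlockNumber l m)) d)
      (PySem.Dict.empty : PySem.Dict (Int × Int) Int)).items
    = (pvPairs lmax).map (fun p => (p, pvBlockNumber p.1 p.2)) := by
  have hfold :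
      ((pvPairs lmax).foldl
        (fun (d : PySem.Dict (Int × Int) Int) p => d.insert ((fun q => q) p) (pvBlockNumber p.1 p.2))
        PySem.Dict.empty)
      = (PySem.List.pyRange 0 (lmax+1) 1).foldl
          (fun d l => (PySem.List.pyRange (-l) (l+1) 1).foldl
            (fun d m => d.insert (l, m) (pvBlockNumber l m)) d)
          PySem.Dict.empty := by
    unfold pvPairs
    rw [List.foldl_flatMap]
    simp only [List.foldl_map]
  rw [← hfold]
  rw [PySem.Dict.items_foldl_insert_fresh (pvPairs lmax) (fun q => q)
        (fun p => pvBlockNumber p.1 p.2) PySem.Dict.empty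
        (fun a _ => PySem.Dict.contains_empty _)
        (by simpa using pvPairs_nodup lmax)]
  simp [PySem.Dict.empty]

theorem lm_to_block_spec : Claim_equal_lm_to_block := by
  intro lmax _
  unfold Spec_lm_to_block lm_to_block
  rw [pvFold_items, List.map_map]
  unfold lm_to_block_alt pvPairs
  rw [List.map_flatMap]
  refine List.flatMap_congr ?_
  intro l hl
  have hl0 : 0 ≤ l := (PySem.List.mem_pyRange_one.mp hl).1
  rw [List.map_map]
  refine List.map_congr_left ?_
  intro m _
  simp [Function.comp, pvBlockNumber_closed l m hl0]
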